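-- pv_equiv track=rewrite | github.com/linh-phuong/coursera-ucsd-bioinfo-2 | week4/convolution.py | dict_convolution_filter
-- ===== SOURCE A (Python) =====
-- from collections import defaultdict
--
-- def dict_convolution_filter(exp_spectrum):
--     exp_spectrum = sorted(exp_spectrum)
--     c_spectrum = defaultdict(lambda: 0)
--     for s0 in exp_spectrum[1:]:
--         for s1 in exp_spectrum:
--             cs = s0 - s1
--             if 200 >= cs >= 57:
--                 c_spectrum[cs] += 1
--             elif cs < 0:
--                 break
--     return c_spectrum
-- ===== SOURCE B (Python) =====
-- from collections import Counter
--
-- def dict_convolution_filter(exp_spectrum):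
--     cnt = Counter(exp_spectrum)
--     res = {}
--     prev = []
--     for v in sorted(cnt):
--         for w in prev:
--             d = v - w
--             if 57 <= d <= 200:
--                 res[d] = res.get(d, 0) + cnt[v] * cnt[w]
--         prev.append(v)
--     return res
-- ===== Notes on version B (the rewrite author's own statement) =====
-- stated objective: faster
-- what changed: B builds a Counter of masses once and iterates over the sorted DISTINCT masses, adding freq[v]*freq[w] per qualifying pair of distinct values, instead of A's quadratic double loop over every element of the sorted spectrum adding 1 per element pair.
import Mathlib
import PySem

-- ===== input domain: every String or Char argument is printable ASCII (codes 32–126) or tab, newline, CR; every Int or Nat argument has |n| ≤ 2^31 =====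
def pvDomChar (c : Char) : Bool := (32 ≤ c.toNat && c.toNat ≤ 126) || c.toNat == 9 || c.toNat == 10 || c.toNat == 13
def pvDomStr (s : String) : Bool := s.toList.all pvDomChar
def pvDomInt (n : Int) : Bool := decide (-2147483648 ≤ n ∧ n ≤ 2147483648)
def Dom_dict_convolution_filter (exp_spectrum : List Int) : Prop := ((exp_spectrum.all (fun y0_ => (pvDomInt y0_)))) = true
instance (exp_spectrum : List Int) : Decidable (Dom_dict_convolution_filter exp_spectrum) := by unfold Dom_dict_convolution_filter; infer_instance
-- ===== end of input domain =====

-- B replaces A's quadratic scan over all spectrum elements by a grouped scan over the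
-- DISTINCT masses with multiplicities from a Counter (objective: faster on duplicate-heavy input).

-- ===== PORT A =====
-- inner 'for s1 in exp_spectrum' loop with its break (the 'elif cs < 0: break' arm stops the scan)
def pvInnerA (s0 : Int) : List Int → PySem.Dict Int Int → PySem.Dict Int Int
  | [], d => d
  | s1 :: rest, d =>
    let cs := s0 - s1
    if 200 ≥ cs ∧ cs ≥ 57 then pvInnerA s0 rest (d.insert cs (d.getD cs 0 + 1))
    else if cs < 0 then d
    else pvInnerA s0 rest d

def dict_convolution_filter (exp_spectrum : List Int) : List (Int × Int) :=
  let es := PySem.List.sorted exp_spectrum (fun x => x) false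
  ((PySem.List.slice es (some 1) none).foldl (fun d s0 => pvInnerA s0 es d)
    PySem.Dict.empty).items

-- ===== PORT B =====
def dict_convolution_filter_alt (exp_spectrum : List Int) : List (Int × Int) :=
  let cnt := PySem.Dict.counter exp_spectrum
  ((PySem.List.sorted cnt.keys (fun x => x) false).foldl
      (fun (st : PySem.Dict Int Int × List Int) (v : Int) =>
        (st.2.foldl (fun res w =>
            let d := v - w
            if 57 ≤ d ∧ d ≤ 200 then res.insert d (res.getD d 0 + cnt.getD v 0 * cnt.getD w 0)
            else res) st.1,
         st.2 ++ [v]))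
      (PySem.Dict.empty, [])).1.items

-- ===== PRECONDITION & SPEC =====
def Spec_dict_convolution_filter (exp_spectrum : List Int) (out : List (Int × Int)) : Prop := out = dict_convolution_filter_alt exp_spectrum
instance (exp_spectrum : List Int) (out : List (Int × Int)) : Decidable (Spec_dict_convolution_filter exp_spectrum out) := by unfold Spec_dict_convolution_filter; infer_instance

-- ===== CLAIM (what is proved, stated in full; the proofs are below) =====
def Claim_equal_dict_convolution_filter : Prop := ∀ (exp_spectrum : List Int), Dom_dict_convolution_filter exp_spectrum → Spec_dict_convolution_filter exp_spectrum (dict_convolution_filter exp_spectrum)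

-- ===== LEMMAS AND PROOFS =====

-- apply a list of (key, weight) increments 'res[k] = res.get(k, 0) + w' to a dict
def pvAddAll (d : PySem.Dict Int Int) (L : List (Int × Int)) : PySem.Dict Int Int :=
  L.foldl (fun d p => d.insert p.1 (d.getD p.1 0 + p.2)) d

-- total weight a stream of increments gives to key k
def pvWsum (L : List (Int × Int)) (k : Int) : Int :=
  ((L.filter (fun p => p.1 == k)).map (·.2)).sum

def pvPred (v w : Int) : Bool := decide (57 ≤ v - w ∧ v - w ≤ 200)

-- the increments one source mass v generates while scanning candidate masses l
def pvStream (l : List Int) (c : Int → Int → Int) (v : Int) : List (Int × Int) :=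
  (l.filter (pvPred v)).map (fun w => (v - w, c v w))

-- B's outer loop as a stream: p = already-processed prefix
def pvGB (c : Int → Int → Int) : List Int → List Int → List (Int × Int)
  | _, [] => []
  | p, v :: vs => pvStream p c v ++ pvGB c (p ++ [v]) vs

lemma pvAddAll_append (d : PySem.Dict Int Int) (L1 L2 : List (Int × Int)) :
    pvAddAll d (L1 ++ L2) = pvAddAll (pvAddAll d L1) L2 := by
  simp [pvAddAll]

lemma pvWsum_append (L1 L2 : List (Int × Int)) (k : Int) :
    pvWsum (L1 ++ L2) k = pvWsum L1 k + pvWsum L2 k := by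
  simp [pvWsum]

lemma pvWsum_flatMap (l : List Int) (g : Int → List (Int × Int)) (k : Int) :
    pvWsum (l.flatMap g) k = (l.map (fun v => pvWsum (g v) k)).sum := by
  induction l with
  | nil => simp [pvWsum]
  | cons v vs ih => simp [List.flatMap_cons, pvWsum_append, ih]

lemma pvAddAll_flatMap (l : List Int) (g : Int → List (Int × Int)) (d : PySem.Dict Int Int) :
    l.foldl (fun d v => pvAddAll d (g v)) d = pvAddAll d (l.flatMap g) := by
  induction l generalizing d with
  | nil => simp [pvAddAll]
  | cons v vs ih => simp [List.flatMap_cons, pvAddAll_append, ih]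

lemma pvGetD_addAll (L : List (Int × Int)) (d : PySem.Dict Int Int) (k : Int) :
    (pvAddAll d L).getD k 0 = d.getD k 0 + pvWsum L k := by
  induction L generalizing d with
  | nil => simp [pvAddAll, pvWsum]
  | cons p L ih =>
      simp only [pvAddAll, List.foldl_cons] at *
      rw [ih, PySem.Dict.getD_insert]
      by_cases h : k = p.1
      · subst h
        simp [pvWsum, add_assoc]
      · have hb : (p.1 == k) = false := by simp [Ne.symm h]
        simp [pvWsum, h, hb]

lemma pvKeys_addAll (L : List (Int × Int)) (d : PySem.Dict Int Int) :
    (pvAddAll d L).keys = PySem.Set.update d.keys (L.map (·.1)) := by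
  exact PySem.Dict.keys_foldl_insert_key L (·.1) (fun d p => d.getD p.1 0 + p.2) d

lemma pvItems_addAll (L : List (Int × Int)) :
    (pvAddAll PySem.Dict.empty L).items
      = (PySem.Set.ofList (L.map (·.1))).map (fun k => (k, pvWsum L k)) := by
  have hnd : (pvAddAll PySem.Dict.empty L).keys.Nodup := by
    have := PySem.Dict.nodup_keys_foldl_insert_key L (·.1)
      (fun d (p : Int × Int) => d.getD p.1 0 + p.2) PySem.Dict.empty
      (by simp [PySem.Dict.keys_empty])
    exact this
  rw [PySem.Dict.items_eq_map_keys _ hnd 0, pvKeys_addAll, PySem.Dict.keys_empty,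
    PySem.Set.update_nil_left]
  exact List.map_congr_left (fun k _ => by rw [pvGetD_addAll]; simp [PySem.Dict.getD_empty])

-- ==== port A reduced to a stream ====

lemma pvInnerA_eq_stream (s0 : Int) (es : List Int) (d : PySem.Dict Int Int)
    (h : es.Pairwise (· ≤ ·)) :
    pvInnerA s0 es d = pvAddAll d (pvStream es (fun _ _ => 1) s0) := by
  induction es generalizing d with
  | nil => simp [pvInnerA, pvStream, pvAddAll]
  | cons s1 rest ih =>
    rcases List.pairwise_cons.mp h with ⟨hle, hrest⟩
    by_cases hc : 200 ≥ s0 - s1 ∧ s0 - s1 ≥ 57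
    · have hp : pvPred s0 s1 = true := by simp only [pvPred]; simp; omega
      simp only [pvInnerA, if_pos hc]
      rw [ih _ hrest]
      simp [pvStream, hp, pvAddAll]
    · by_cases hneg : s0 - s1 < 0
      · have hnil : pvStream (s1 :: rest) (fun _ _ => 1) s0 = [] := by
          have : (s1 :: rest).filter (pvPred s0) = [] := by
            rw [List.filter_eq_nil_iff]
            intro w hw
            have hw' : s1 ≤ w := by
              rcases List.mem_cons.mp hw with h1 | h2
              · omega
              · exact hle w h2
            simp only [pvPred]; simp; omega
          simp [pvStream, this]
        simp only [pvInnerA, if_neg hc, if_pos hneg, hnil]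
        simp [pvAddAll]
      · have hp : pvPred s0 s1 = false := by simp only [pvPred]; simp; omega
        simp only [pvInnerA, if_neg hc, if_neg hneg]
        rw [ih _ hrest]
        simp [pvStream, hp]

lemma pvA_eq (xs : List Int) :
    dict_convolution_filter xs
      = (pvAddAll PySem.Dict.empty
          ((PySem.List.sorted xs (fun x => x) false).flatMap
            (pvStream (PySem.List.sorted xs (fun x => x) false) (fun _ _ => 1)))).items := by
  show ((PySem.List.slice (PySem.List.sorted xs (fun x => x) false) (some 1) none).foldl
      (fun d s0 => pvInnerA s0 (PySem.List.sorted xs (fun x => x) false) d)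
      PySem.Dict.empty).items = _
  rw [PySem.List.slice_from_one]
  have hpw : (PySem.List.sorted xs (fun x => x) false).Pairwise (· ≤ ·) :=
    PySem.List.sorted_pairwise xs (fun x => x)
  rw [PySem.List.foldl_congr_mem _ _
    (fun d v => pvAddAll d (pvStream (PySem.List.sorted xs (fun x => x) false) (fun _ _ => 1) v)) _
    (fun d v _ => pvInnerA_eq_stream v _ d hpw)]
  rw [pvAddAll_flatMap]
  cases hes : PySem.List.sorted xs (fun x => x) false with
  | nil => simp
  | cons m t =>
    have hmin : ∀ y ∈ xs, m ≤ y := PySem.List.key_head_sorted_le xs (fun x => x) hes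
    have hnil : pvStream (m :: t) (fun _ _ => 1) m = [] := by
      have : (m :: t).filter (pvPred m) = [] := by
        rw [List.filter_eq_nil_iff]
        intro w hw
        have hw' : m ≤ w := by
          have : w ∈ xs := by
            have := (PySem.List.sorted_perm xs (fun x => x) false).mem_iff (a := w)
            rw [hes] at this
            exact this.mp hw
          exact hmin w this
        simp only [pvPred]; simp; omega
      simp [pvStream, this]
    simp only [List.tail_cons, List.flatMap_cons, hnil, List.nil_append]

-- ==== port B reduced to a stream ====

lemma pvAddAll_map (l : List Int) (k c : Int → Int) (res : PySem.Dict Int Int) :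
    l.foldl (fun res w => res.insert (k w) (res.getD (k w) 0 + c w)) res
      = pvAddAll res (l.map (fun w => (k w, c w))) := by
  induction l generalizing res with
  | nil => simp [pvAddAll]
  | cons w l ih => simp [pvAddAll, List.foldl_cons] at *; rw [ih]

lemma pvGB_eq_flatMap (c : Int → Int → Int) (p vs : List Int)
    (h : (p ++ vs).Pairwise (· < ·)) :
    pvGB c p vs = vs.flatMap (pvStream (p ++ vs) c) := by
  induction vs generalizing p with
  | nil => simp [pvGB]
  | cons v vs ih =>
    have h' : ((p ++ [v]) ++ vs).Pairwise (· < ·) := by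
      simpa using h
    have hvvs : ∀ w ∈ v :: vs, v ≤ w := by
      have h2 : (v :: vs).Pairwise (· < ·) := (List.pairwise_append.mp h).2.1
      intro w hw
      rcases List.mem_cons.mp hw with h1 | h2'
      · omega
      · exact le_of_lt ((List.pairwise_cons.mp h2).1 w h2')
    have hstream : pvStream p c v = pvStream (p ++ v :: vs) c v := by
      have : (v :: vs).filter (pvPred v) = [] := by
        rw [List.filter_eq_nil_iff]
        intro w hw
        have := hvvs w hw
        simp only [pvPred]; simp; omega
      simp [pvStream, List.filter_append, this]
    rw [List.flatMap_cons, ← hstream]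
    simp only [pvGB]
    rw [ih _ h']
    simp

-- ==== the sorted list decomposes into its distinct values with multiplicities ====

lemma pvCount_flatMap_rep (vals : List Int) (n : Int → Nat) (hnd : vals.Nodup) (z : Int) :
    (vals.flatMap (fun v => List.replicate (n v) v)).count z
      = if z ∈ vals then n z else 0 := by
  induction vals with
  | nil => simp
  | cons v vs ih =>
    rcases List.nodup_cons.mp hnd with ⟨hv, hvs⟩
    simp only [List.flatMap_cons, List.count_append, List.count_replicate, ih hvs]
    by_cases hz : z = v
    · subst hz; simp [hv]
    · simp [hz, Ne.symm hz, List.mem_cons]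

lemma pvPairwise_flatMap_rep (vals : List Int) (n : Int → Nat)
    (h : vals.Pairwise (· < ·)) :
    (vals.flatMap (fun v => List.replicate (n v) v)).Pairwise (· ≤ ·) := by
  induction vals with
  | nil => simp
  | cons v vs ih =>
    rcases List.pairwise_cons.mp h with ⟨hv, hvs⟩
    simp only [List.flatMap_cons]
    rw [List.pairwise_append]
    refine ⟨?_, ih hvs, ?_⟩
    · exact List.pairwise_replicate.mpr (Or.inr le_rfl)
    · intro a ha b hb
      have ha' : a = v := List.eq_of_mem_replicate ha
      rcases List.mem_flatMap.mp hb with ⟨w, hw, hbw⟩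
      have hb' : b = w := List.eq_of_mem_replicate hbw
      subst ha'; subst hb'
      exact le_of_lt (hv b hw)

lemma pvVals_nodup (xs : List Int) :
    (PySem.List.sorted (PySem.Dict.counter xs).keys (fun x => x) false).Nodup := by
  have hperm := PySem.List.sorted_perm (PySem.Dict.counter xs).keys (fun x => x) false
  have : (PySem.Dict.counter xs).keys.Nodup := by
    rw [PySem.Dict.keys_counter]; exact PySem.Set.nodup_ofList xs
  exact hperm.symm.nodup this

lemma pvVals_pairwise_lt (xs : List Int) :
    (PySem.List.sorted (PySem.Dict.counter xs).keys (fun x => x) false).Pairwise (· < ·) := by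
  have h1 := PySem.List.sorted_pairwise (PySem.Dict.counter xs).keys (fun x => x)
  have h2 : (PySem.List.sorted (PySem.Dict.counter xs).keys (fun x => x) false).Pairwise (· ≠ ·) :=
    pvVals_nodup xs
  exact (h1.and h2).imp (fun h => lt_of_le_of_ne h.1 h.2)

lemma pvMem_vals (xs : List Int) (z : Int) :
    z ∈ PySem.List.sorted (PySem.Dict.counter xs).keys (fun x => x) false ↔ z ∈ xs := by
  rw [(PySem.List.sorted_perm (PySem.Dict.counter xs).keys (fun x => x) false).mem_iff,
    PySem.Dict.keys_counter]
  exact PySem.Set.mem_ofList xs z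

lemma pvB_eq (xs : List Int) :
    dict_convolution_filter_alt xs
      = (pvAddAll PySem.Dict.empty
          ((PySem.List.sorted (PySem.Dict.counter xs).keys (fun x => x) false).flatMap
            (pvStream (PySem.List.sorted (PySem.Dict.counter xs).keys (fun x => x) false)
              (fun v w => (xs.count v : Int) * (xs.count w : Int))))).items := by
  show (((PySem.List.sorted (PySem.Dict.counter xs).keys (fun x => x) false).foldl
      (fun (st : PySem.Dict Int Int × List Int) (v : Int) =>
        (st.2.foldl (fun res w =>
            if 57 ≤ v - w ∧ v - w ≤ 200 then
              res.insert (v - w) (res.getD (v - w) 0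
                + (PySem.Dict.counter xs).getD v 0 * (PySem.Dict.counter xs).getD w 0)
            else res) st.1,
         st.2 ++ [v]))
      (PySem.Dict.empty, [])).1).items = _
  have hinner : ∀ (v : Int) (l : List Int) (res : PySem.Dict Int Int),
      l.foldl (fun res w =>
        if 57 ≤ v - w ∧ v - w ≤ 200 then
          res.insert (v - w) (res.getD (v - w) 0
            + (PySem.Dict.counter xs).getD v 0 * (PySem.Dict.counter xs).getD w 0)
        else res) res
      = pvAddAll res (pvStream l (fun v w => (xs.count v : Int) * (xs.count w : Int)) v) := by
    intro v l res
    rw [PySem.List.foldl_ite_eq_foldl_filter (p := fun w => 57 ≤ v - w ∧ v - w ≤ 200)]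
    have hfil : l.filter (fun w => decide (57 ≤ v - w ∧ v - w ≤ 200)) = l.filter (pvPred v) := rfl
    rw [hfil]
    rw [pvAddAll_map (l.filter (pvPred v)) (fun w => v - w)
      (fun w => (PySem.Dict.counter xs).getD v 0 * (PySem.Dict.counter xs).getD w 0) res]
    simp only [pvStream, PySem.Dict.getD_counter]
  have houter : ∀ (vs : List Int) (p : List Int) (d : PySem.Dict Int Int),
      (vs.foldl
        (fun (st : PySem.Dict Int Int × List Int) (v : Int) =>
          (st.2.foldl (fun res w =>
              if 57 ≤ v - w ∧ v - w ≤ 200 then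
                res.insert (v - w) (res.getD (v - w) 0
                  + (PySem.Dict.counter xs).getD v 0 * (PySem.Dict.counter xs).getD w 0)
              else res) st.1,
           st.2 ++ [v]))
        (d, p))
      = (pvAddAll d (pvGB (fun v w => (xs.count v : Int) * (xs.count w : Int)) p vs), p ++ vs) := by
    intro vs
    induction vs with
    | nil => intro p d; simp [pvGB, pvAddAll]
    | cons v vs ih =>
      intro p d
      simp only [List.foldl_cons]
      rw [hinner v p d]
      rw [ih]
      simp [pvGB, pvAddAll_append]
  rw [houter]
  rw [pvGB_eq_flatMap _ _ _ (by simpa using pvVals_pairwise_lt xs)]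
  simp

lemma pvGroup (xs : List Int) :
    PySem.List.sorted xs (fun x => x) false
      = (PySem.List.sorted (PySem.Dict.counter xs).keys (fun x => x) false).flatMap
          (fun v => List.replicate (xs.count v) v) := by
  apply PySem.List.sorted_id_eq_of_perm_of_pairwise
  · rw [List.perm_iff_count]
    intro z
    rw [pvCount_flatMap_rep _ _ (pvVals_nodup xs) z]
    by_cases hz : z ∈ xs
    · rw [if_pos ((pvMem_vals xs z).mpr hz)]
    · rw [if_neg (fun hm => hz ((pvMem_vals xs z).mp hm))]
      exact (List.count_eq_zero.mpr hz).symm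
  · exact pvPairwise_flatMap_rep _ _ (pvVals_pairwise_lt xs)

-- ==== key-set equality (K) ====

-- the key list one source mass v contributes while scanning l
def pvKeyB (l : List Int) (v : Int) : List Int :=
  (l.filter (pvPred v)).map (fun w => v - w)

lemma pvUpdate_subset (s : PySem.Set Int) (X : List Int) (h : ∀ x ∈ X, x ∈ s) :
    PySem.Set.update s X = s := by
  rw [PySem.Set.update_eq_append_filter]
  have hnil : (PySem.Set.ofList X).filter (fun y => !PySem.Set.contains s y) = [] := by
    rw [List.filter_eq_nil_iff]
    intro y hy
    have hys : y ∈ s := h y ((PySem.Set.mem_ofList X y).mp hy)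
    simp [hys]
  rw [hnil, List.append_nil]

lemma pvFoldl_flatMap {σ α β : Type} (l : List α) (g : α → List β) (f : σ → β → σ) (s : σ) :
    (l.flatMap g).foldl f s = l.foldl (fun s v => (g v).foldl f s) s := by
  induction l generalizing s with
  | nil => rfl
  | cons v vs ih => simp [List.flatMap_cons, List.foldl_append, ih]

lemma pvUpdate_flatMap (l : List Int) (g : Int → List Int) (s : PySem.Set Int) :
    PySem.Set.update s (l.flatMap g) = l.foldl (fun s v => PySem.Set.update s (g v)) s := by
  induction l generalizing s with
  | nil => simp [PySem.Set.update_nil]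
  | cons v vs ih => simp only [List.flatMap_cons, PySem.Set.update_append, List.foldl_cons, ih]

lemma pvUpdate_single (s : PySem.Set Int) (x : Int) :
    PySem.Set.update s [x] = PySem.Set.add s x := by
  rw [PySem.Set.update_cons, PySem.Set.update_nil]

lemma pvUpdate_replicate (s : PySem.Set Int) (x : Int) (m : Nat) (h : 1 ≤ m) :
    PySem.Set.update s (List.replicate m x) = PySem.Set.add s x := by
  obtain ⟨m', rfl⟩ : ∃ m', m = m' + 1 := ⟨m - 1, by omega⟩
  rw [List.replicate_succ, PySem.Set.update_cons]
  apply pvUpdate_subset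
  intro y hy
  rw [List.eq_of_mem_replicate hy]
  exact (PySem.Set.mem_add s x x).mpr (Or.inr rfl)

lemma pvFoldl_replicate_update (K : Int → List Int) (v : Int) (m : Nat) (h : 1 ≤ m)
    (s : PySem.Set Int) :
    (List.replicate m v).foldl (fun s w => PySem.Set.update s (K w)) s
      = PySem.Set.update s (K v) := by
  induction m generalizing s with
  | zero => omega
  | succ m ih =>
    rw [List.replicate_succ, List.foldl_cons]
    rcases Nat.eq_zero_or_pos m with h0 | hpos
    · subst h0; simp
    · rw [ih hpos]
      apply pvUpdate_subset
      intro x hx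
      exact (PySem.Set.mem_update _ _ x).mpr (Or.inr hx)

lemma pvFilterMap_flatMap (l : List Int) (p : Int → Bool) (f : Int → Int) :
    (l.filter p).map f = l.flatMap (fun w => if p w then [f w] else []) := by
  induction l with
  | nil => rfl
  | cons w l ih => by_cases hw : p w <;> simp [hw, ih]

lemma pvFilter_flatMap (l : List Int) (g : Int → List Int) (p : Int → Bool) :
    (l.flatMap g).filter p = l.flatMap (fun v => (g v).filter p) := by
  induction l with
  | nil => rfl
  | cons v vs ih => simp [List.filter_append, ih]

lemma pvCount_pos (xs : List Int) (v : Int)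
    (hv : v ∈ PySem.List.sorted (PySem.Dict.counter xs).keys (fun x => x) false) :
    1 ≤ xs.count v := by
  have : v ∈ xs := (pvMem_vals xs v).mp hv
  exact List.count_pos_iff.mpr this

lemma pvKeyB_group (xs : List Int) (v : Int) (s : PySem.Set Int) :
    PySem.Set.update s
        (pvKeyB ((PySem.List.sorted (PySem.Dict.counter xs).keys (fun x => x) false).flatMap
          (fun w => List.replicate (xs.count w) w)) v)
      = PySem.Set.update s
        (pvKeyB (PySem.List.sorted (PySem.Dict.counter xs).keys (fun x => x) false) v) := by
  have hKA : pvKeyB ((PySem.List.sorted (PySem.Dict.counter xs).keys (fun x => x) false).flatMap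
        (fun w => List.replicate (xs.count w) w)) v
      = (PySem.List.sorted (PySem.Dict.counter xs).keys (fun x => x) false).flatMap
        (fun w => if pvPred v w then List.replicate (xs.count w) (v - w) else []) := by
    unfold pvKeyB
    rw [pvFilter_flatMap, List.map_flatMap]
    congr 1
    funext w
    rw [List.filter_replicate]
    split_ifs <;> simp
  rw [hKA]
  simp only [pvKeyB]
  rw [pvFilterMap_flatMap]
  rw [pvUpdate_flatMap, pvUpdate_flatMap]
  apply PySem.List.foldl_congr_mem
  intro s w hw
  by_cases hp : pvPred v w
  · rw [if_pos hp, if_pos hp, pvUpdate_replicate _ _ _ (pvCount_pos xs w hw),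
      pvUpdate_single]
  · rw [if_neg hp, if_neg hp]

lemma pvK_update (xs : List Int) (s : PySem.Set Int) :
    PySem.Set.update s
        ((PySem.List.sorted xs (fun x => x) false).flatMap
          (pvKeyB (PySem.List.sorted xs (fun x => x) false)))
      = PySem.Set.update s
        ((PySem.List.sorted (PySem.Dict.counter xs).keys (fun x => x) false).flatMap
          (pvKeyB (PySem.List.sorted (PySem.Dict.counter xs).keys (fun x => x) false))) := by
  rw [pvGroup xs]
  rw [pvUpdate_flatMap, pvUpdate_flatMap, pvFoldl_flatMap]
  apply PySem.List.foldl_congr_mem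
  intro s v hv
  rw [pvFoldl_replicate_update _ _ _ (pvCount_pos xs v hv)]
  exact pvKeyB_group xs v s

lemma pvK (xs : List Int) :
    PySem.Set.ofList
        (((PySem.List.sorted xs (fun x => x) false).flatMap
          (pvStream (PySem.List.sorted xs (fun x => x) false) (fun _ _ => 1))).map (·.1))
      = PySem.Set.ofList
        (((PySem.List.sorted (PySem.Dict.counter xs).keys (fun x => x) false).flatMap
          (pvStream (PySem.List.sorted (PySem.Dict.counter xs).keys (fun x => x) false)
            (fun v w => (xs.count v : Int) * (xs.count w : Int)))).map (·.1)) := by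
  have hmapA : ∀ (l : List Int) (c : Int → Int → Int) (base : List Int),
      ((base.flatMap (pvStream l c)).map (·.1)) = base.flatMap (pvKeyB l) := by
    intro l c base
    rw [List.map_flatMap]
    congr 1
    funext v
    simp [pvStream, pvKeyB, List.map_map, Function.comp]
  rw [hmapA, hmapA, ← PySem.Set.update_nil_left, ← PySem.Set.update_nil_left]
  exact pvK_update xs []

-- ==== weight-sum equality (S) ====

lemma pvWsum_stream (l : List Int) (c : Int → Int → Int) (v k : Int) :
    pvWsum (pvStream l c v) k
      = if 57 ≤ k ∧ k ≤ 200 then ((l.filter (fun w => w == v - k)).map (c v)).sum else 0 := by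
  unfold pvWsum pvStream
  rw [List.filter_map, List.filter_filter, List.map_map]
  simp only [Function.comp_def]
  split_ifs with hk
  · have hpred : ∀ w ∈ l, (((v - w, c v w).1 == k) && pvPred v w) = (w == v - k) := by
      intro w _
      by_cases hw : w = v - k
      · subst hw
        have h2 : pvPred v (v - k) = true := by simp only [pvPred]; simp; omega
        simp [h2]
      · have h1 : (w == v - k) = false := by simp [hw]
        have h2 : (v - w == k) = false := by simp; omega
        simp [h1, h2]
    rw [List.filter_congr hpred]
  · have hpred : ∀ w ∈ l, (((v - w, c v w).1 == k) && pvPred v w) = false := by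
      intro w _
      by_cases hw : v - w = k
      · have h2 : pvPred v w = false := by simp only [pvPred]; simp; omega
        simp [h2]
      · have h1 : (v - w == k) = false := by simp [hw]
        simp [h1]
    rw [List.filter_congr hpred, List.filter_false]
    simp

lemma pvSum_flatMap_rep (vals : List Int) (n : Int → Nat) (h : Int → Int) :
    ((vals.flatMap (fun v => List.replicate (n v) v)).map h).sum
      = (vals.map (fun v => (n v : Int) * h v)).sum := by
  induction vals with
  | nil => rfl
  | cons v vs ih => simp [ih, List.sum_replicate]

lemma pvS (xs : List Int) (k : Int) :
    pvWsum ((PySem.List.sorted xs (fun x => x) false).flatMap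
        (pvStream (PySem.List.sorted xs (fun x => x) false) (fun _ _ => 1))) k
      = pvWsum ((PySem.List.sorted (PySem.Dict.counter xs).keys (fun x => x) false).flatMap
        (pvStream (PySem.List.sorted (PySem.Dict.counter xs).keys (fun x => x) false)
          (fun v w => (xs.count v : Int) * (xs.count w : Int)))) k := by
  rw [pvWsum_flatMap, pvWsum_flatMap]
  by_cases hk : 57 ≤ k ∧ k ≤ 200
  · have hA : ∀ v : Int,
        pvWsum (pvStream (PySem.List.sorted xs (fun x => x) false) (fun _ _ => 1) v) k
          = (xs.count (v - k) : Int) := by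
      intro v
      rw [pvWsum_stream, if_pos hk, List.filter_beq,
        (PySem.List.sorted_perm xs (fun x => x) false).count_eq]
      simp [List.sum_replicate]
    have hB : ∀ v : Int,
        pvWsum (pvStream (PySem.List.sorted (PySem.Dict.counter xs).keys (fun x => x) false)
          (fun v w => (xs.count v : Int) * (xs.count w : Int)) v) k
          = (((PySem.List.sorted (PySem.Dict.counter xs).keys (fun x => x) false).count (v - k) : Int))
            * ((xs.count v : Int) * (xs.count (v - k) : Int)) := by
      intro v
      rw [pvWsum_stream, if_pos hk, List.filter_beq]
      simp [List.sum_replicate]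
    rw [List.map_congr_left (fun v _ => hA v), List.map_congr_left (fun v _ => hB v)]
    rw [pvGroup xs, pvSum_flatMap_rep]
    apply congrArg
    apply List.map_congr_left
    intro v _
    by_cases hm : v - k ∈ xs
    · have h1 : (PySem.List.sorted (PySem.Dict.counter xs).keys (fun x => x) false).count (v - k) = 1 :=
        List.count_eq_one_of_mem (pvVals_nodup xs) ((pvMem_vals xs (v - k)).mpr hm)
      rw [h1]
      push_cast
      ring
    · have h1 : (PySem.List.sorted (PySem.Dict.counter xs).keys (fun x => x) false).count (v - k) = 0 :=
        List.count_eq_zero.mpr (fun hmem => hm ((pvMem_vals xs (v - k)).mp hmem))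
      have h2 : xs.count (v - k) = 0 := List.count_eq_zero.mpr hm
      rw [h1, h2]
      simp
  · simp [pvWsum_stream, hk]

-- ===== VERDICT (by name: the statement is the Claim_ definition above) =====
theorem dict_convolution_filter_spec : Claim_equal_dict_convolution_filter := by
  intro xs _
  show dict_convolution_filter xs = dict_convolution_filter_alt xs
  rw [pvA_eq, pvB_eq, pvItems_addAll, pvItems_addAll, pvK xs]
  exact List.map_congr_left (fun k hk => by
    have := pvS xs k
    simp [this])
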